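-- pv_equiv track=rewrite | github.com/humancipher/Programming_Contest | Programming_Contest/AtCoder/ARC/ARC_001-009/ARC_005/ARC_005_B.py | read_pt
-- ===== SOURCE A (Python) =====
-- def read_pt(y,x,vy,vx,read):
--     if len(read) == 4:
--         return read
--     else:
--         if x < 0:
--             x = 1
--             vx *= -1
--         if x > 8:
--             x = 7
--             vx *= -1
--         if y < 0:
--             y = 1
--             vy *= -1
--         if y > 8:
--             y = 7
--             vy *= -1
--         read.append([y,x])
--         return read_pt(y+vy,x+vx,vy,vx,read)
-- ===== SOURCE B (Python) =====
-- def _reflect(p, v):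
--     # fold one axis's two boundary corrections into a single helper
--     if p < 0:
--         return 1, -v
--     if p > 8:
--         return 7, -v
--     return p, v
--
--
-- def read_pt(y, x, vy, vx, read):
--     pts = []
--     while len(read) + len(pts) < 4:
--         y, vy = _reflect(y, vy)
--         x, vx = _reflect(x, vx)
--         pts.append([y, x])
--         y += vy
--         x += vx
--     read.extend(pts)
--     return read
-- ===== Notes on version B (the rewrite author's own statement) =====
-- stated objective: idiomatic
-- what changed: Replaces the tail recursion with four per-call boundary ifs by a while loop using a shared per-axis _reflect helper, collecting the new points in a separate list that is extended onto read at the end.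
-- crash fix: When len(read) > 4, A recurses forever and raises RecursionError; B's while condition is already false there, so B returns read unchanged. — e.g. on read_pt(0, 0, 1, 1, [[0,0],[0,1],[0,2],[0,3],[0,4]]): A raises RecursionError, B returns [[0,0],[0,1],[0,2],[0,3],[0,4]]
import Mathlib
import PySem

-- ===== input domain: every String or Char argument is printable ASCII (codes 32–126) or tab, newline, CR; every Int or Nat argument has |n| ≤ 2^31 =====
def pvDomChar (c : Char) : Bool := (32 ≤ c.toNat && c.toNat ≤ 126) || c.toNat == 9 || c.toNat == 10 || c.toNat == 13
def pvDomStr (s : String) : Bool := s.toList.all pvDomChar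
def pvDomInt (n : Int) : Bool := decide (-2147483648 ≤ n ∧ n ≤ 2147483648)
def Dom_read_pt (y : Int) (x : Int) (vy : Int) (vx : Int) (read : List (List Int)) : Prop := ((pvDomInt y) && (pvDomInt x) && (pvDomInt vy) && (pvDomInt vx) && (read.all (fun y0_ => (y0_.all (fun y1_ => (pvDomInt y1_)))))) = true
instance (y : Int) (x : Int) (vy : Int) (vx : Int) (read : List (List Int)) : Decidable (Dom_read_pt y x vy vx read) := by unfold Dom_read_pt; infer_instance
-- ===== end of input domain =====

-- B replaces A's tail recursion (four inline boundary ifs per call) with a while loop that uses a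
-- shared per-axis reflect helper and collects the new points separately, extending read at the end
-- (idiomatic decomposition, same cost). Both Pythons mutate `read` in place; the equivalence proved
-- here is about the return value.

-- ===== PORT A =====
-- literal transliteration of A's recursion; the `4 < read.length` branch marks where the
-- Python recurses forever (excluded by Pre_), returning `read` only so the Lean function terminates
def read_pt (y : Int) (x : Int) (vy : Int) (vx : Int) (read : List (List Int)) : List (List Int) :=
  if read.length = 4 then read
  else if 4 < read.length then read
  else
    let (x1, vx1) := if x < 0 then ((1 : Int), -vx) else (x, vx)
    let (x2, vx2) := if x1 > 8 then ((7 : Int), -vx1) else (x1, vx1)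
    let (y1, vy1) := if y < 0 then ((1 : Int), -vy) else (y, vy)
    let (y2, vy2) := if y1 > 8 then ((7 : Int), -vy1) else (y1, vy1)
    read_pt (y2 + vy2) (x2 + vx2) vy2 vx2 (read ++ [[y2, x2]])
termination_by 4 - read.length
decreasing_by simp; omega

-- ===== PORT B =====
-- B's _reflect helper: one axis's boundary correction
def pvReflect (p : Int) (v : Int) : Int × Int :=
  if p < 0 then (1, -v)
  else if p > 8 then (7, -v)
  else (p, v)

-- B's while loop: `k` counts how many points are still missing (4 - len(read) - len(pts));
-- `pts` is the list B appends to, extended onto `read` only at the end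
def pvCollect (k : Nat) (y : Int) (x : Int) (vy : Int) (vx : Int) (pts : List (List Int)) : List (List Int) :=
  match k with
  | 0 => pts
  | n + 1 =>
    let (y', vy') := pvReflect y vy
    let (x', vx') := pvReflect x vx
    pvCollect n (y' + vy') (x' + vx') vy' vx' (pts ++ [[y', x']])

def read_pt_alt (y : Int) (x : Int) (vy : Int) (vx : Int) (read : List (List Int)) : List (List Int) :=
  read ++ pvCollect (4 - read.length) y x vy vx []

-- ===== PRECONDITION & SPEC =====
-- Pre_ excludes read.length > 4, on which Python A recurses forever (RecursionError)
def Pre_read_pt (y : Int) (x : Int) (vy : Int) (vx : Int) (read : List (List Int)) : Prop :=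
  read.length ≤ 4
instance (y : Int) (x : Int) (vy : Int) (vx : Int) (read : List (List Int)) : Decidable (Pre_read_pt y x vy vx read) := by unfold Pre_read_pt; infer_instance
def pvWitness_read_pt : Int × Int × Int × Int × List (List Int) := (0, 0, 1, 1, [])

-- A raises RecursionError when len(read) > 4; B's while condition is already false there and B returns read unchanged.
def Raises_read_pt (y : Int) (x : Int) (vy : Int) (vx : Int) (read : List (List Int)) : Prop :=
  4 < read.length
instance (y : Int) (x : Int) (vy : Int) (vx : Int) (read : List (List Int)) : Decidable (Raises_read_pt y x vy vx read) := by unfold Raises_read_pt; infer_instance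
def pvRaiseWitness_read_pt : Int × Int × Int × Int × List (List Int) := (0, 0, 1, 1, [[0,0],[0,1],[0,2],[0,3],[0,4]])
def pvRaiseWitnessOut_read_pt : List (List Int) := [[0,0],[0,1],[0,2],[0,3],[0,4]]

def Spec_read_pt (y : Int) (x : Int) (vy : Int) (vx : Int) (read : List (List Int)) (out : List (List Int)) : Prop := out = read_pt_alt y x vy vx read
instance (y : Int) (x : Int) (vy : Int) (vx : Int) (read : List (List Int)) (out : List (List Int)) : Decidable (Spec_read_pt y x vy vx read out) := by unfold Spec_read_pt; infer_instance

-- ===== CLAIM (what is proved, stated in full; the proofs are below) =====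
def Claim_equal_read_pt : Prop := ∀ (y : Int) (x : Int) (vy : Int) (vx : Int) (read : List (List Int)), Dom_read_pt y x vy vx read → Pre_read_pt y x vy vx read → Spec_read_pt y x vy vx read (read_pt y x vy vx read)
def Claim_raises_read_pt : Prop := (∀ (y : Int) (x : Int) (vy : Int) (vx : Int) (read : List (List Int)), Dom_read_pt y x vy vx read → Raises_read_pt y x vy vx read → ¬ Pre_read_pt y x vy vx read) ∧ (Dom_read_pt (pvRaiseWitness_read_pt.1) (pvRaiseWitness_read_pt.2.1) (pvRaiseWitness_read_pt.2.2.1) (pvRaiseWitness_read_pt.2.2.2.1) (pvRaiseWitness_read_pt.2.2.2.2) ∧ Raises_read_pt (pvRaiseWitness_read_pt.1) (pvRaiseWitness_read_pt.2.1) (pvRaiseWitness_read_pt.2.2.1) (pvRaiseWitness_read_pt.2.2.2.1) (pvRaiseWitness_read_pt.2.2.2.2) ∧ read_pt_alt (pvRaiseWitness_read_pt.1) (pvRaiseWitness_read_pt.2.1) (pvRaiseWitness_read_pt.2.2.1) (pvRaiseWitness_read_pt.2.2.2.1) (pvRaiseWitness_read_pt.2.2.2.2) = pvRaiseWitnessO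ut_read_pt)

-- ===== LEMMAS AND PROOFS =====

-- B's accumulator distributes: the points collected do not depend on what is already in pts
theorem pvCollect_acc : ∀ (k : Nat) (y x vy vx : Int) (pts : List (List Int)),
    pvCollect k y x vy vx pts = pts ++ pvCollect k y x vy vx [] := by
  intro k
  induction k with
  | zero => intro y x vy vx pts; simp [pvCollect]
  | succ n ih =>
    intro y x vy vx pts
    rw [pvCollect, pvCollect]
    simp only []
    rw [ih _ _ _ _ (pts ++ _), ih _ _ _ _ ([] ++ _)]
    simp

theorem read_pt_eq_collect : ∀ (n : Nat) (y x vy vx : Int) (read : List (List Int)),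
    read.length + n = 4 → read_pt y x vy vx read = read ++ pvCollect n y x vy vx [] := by
  intro n
  induction n with
  | zero =>
    intro y x vy vx read h
    have h4 : read.length = 4 := by omega
    rw [read_pt]
    simp [h4, pvCollect]
  | succ n ih =>
    intro y x vy vx read h
    have h1 : ¬ read.length = 4 := by omega
    have h2 : ¬ 4 < read.length := by omega
    rw [read_pt]
    simp only [h1, h2, if_false]
    rw [ih _ _ _ _ _ (by simp; omega)]
    rw [pvCollect]
    simp only [pvReflect]
    rw [pvCollect_acc n _ _ _ _ ([] ++ _)]
    split_ifs <;> simp_all <;> omega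

-- ===== VERDICT (by name: the statement is the Claim_ definition above) =====
theorem read_pt_spec : Claim_equal_read_pt := by
  intro y x vy vx read _ hpre
  unfold Spec_read_pt read_pt_alt
  exact read_pt_eq_collect (4 - read.length) y x vy vx read (by unfold Pre_read_pt at hpre; omega)

theorem read_pt_raises : Claim_raises_read_pt := by
  unfold Claim_raises_read_pt
  exact ⟨by intro y x vy vx read _ hr; unfold Raises_read_pt at hr; unfold Pre_read_pt; omega, by decide⟩

-- self-check: B's port really returns the stated literal at the raise witness (extracted from read_pt_raises)
theorem read_pt_raises_witness_ok :
    read_pt_alt (pvRaiseWitness_read_pt.1) (pvRaiseWitness_read_pt.2.1) (pvRaiseWitness_read_pt.2.2.1)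
      (pvRaiseWitness_read_pt.2.2.2.1) (pvRaiseWitness_read_pt.2.2.2.2) = pvRaiseWitnessOut_read_pt :=
  read_pt_raises.2.2.2
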